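-- pv_equiv track=rewrite | github.com/Tedfulk/advent_of_code | 2022/7d_2022/7d.py | first_start_of_packet_marker
-- ===== SOURCE A (Python) =====
-- def first_start_of_packet_marker(data: str, marker_index: int):
--     for i in range(marker_index, len(data)):
--         sequence = data[i - marker_index : i]
--         found = False
--         for j in range(marker_index):
--             for k in range(j + 1, marker_index):
--                 if sequence[j] == sequence[k]:
--                     found = True
--
--         if not found:
--             return i
-- ===== SOURCE B (Python) =====
-- def first_start_of_packet_marker(data, marker_index):
--     n = len(data)
--     if marker_index >= n:
--         return None
--     if marker_index <= 0:
--         # a window of non-positive size is vacuously all-distinct,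
--         # so the first scanned index qualifies immediately
--         return marker_index
--     counts = {}
--     dup = 0  # number of distinct chars occurring >= 2 times in the window
--     for c in data[:marker_index]:
--         counts[c] = counts.get(c, 0) + 1
--         if counts[c] == 2:
--             dup += 1
--     for i in range(marker_index, n):
--         if dup == 0:
--             return i
--         out = data[i - marker_index]
--         if counts[out] == 2:
--             dup -= 1
--         counts[out] -= 1
--         c = data[i]
--         counts[c] = counts.get(c, 0) + 1
--         if counts[c] == 2:
--             dup += 1
--     return None
-- ===== Notes on version B (the rewrite author's own statement) =====
-- stated objective: faster
-- what changed: Replaces the per-position quadratic all-pairs duplicate scan with a single sliding window that maintains a character-count dict and an incremental count of duplicated characters.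
import Mathlib
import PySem

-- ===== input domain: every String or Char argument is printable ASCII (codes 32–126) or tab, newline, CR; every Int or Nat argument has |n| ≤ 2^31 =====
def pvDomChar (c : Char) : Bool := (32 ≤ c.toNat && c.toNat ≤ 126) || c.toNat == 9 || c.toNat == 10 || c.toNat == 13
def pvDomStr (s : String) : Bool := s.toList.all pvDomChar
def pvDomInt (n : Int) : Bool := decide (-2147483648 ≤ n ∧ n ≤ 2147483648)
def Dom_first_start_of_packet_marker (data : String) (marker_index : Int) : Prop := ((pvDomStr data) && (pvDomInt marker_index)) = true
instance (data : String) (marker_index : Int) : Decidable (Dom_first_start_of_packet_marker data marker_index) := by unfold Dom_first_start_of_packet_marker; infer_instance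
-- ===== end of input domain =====

-- B replaces A's per-position all-pairs duplicate scan by a single sliding window with a
-- character-count dict and an incremental duplicate counter (objective: faster).

-- ===== PORT A =====
-- Literal port of A: string indexing/slicing is ported through the character list
-- (exact: Python compares the length-1 slices of `sequence`, i.e. its characters).
-- A's nested 'for j … for k …' loops computing `found`
def pvAInner (sequence : List Char) (marker_index : Int) : Bool :=
  (PySem.List.pyRange 0 marker_index 1).foldl (fun found j =>
    (PySem.List.pyRange (j + 1) marker_index 1).foldl (fun found k =>
      if PySem.List.pyGet? sequence j = PySem.List.pyGet? sequence k then true else found)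
      found) false

-- 'for i in range(marker_index, len(data)): … if not found: return i'
-- (the lazy 'range' is ported as an index recursion, not a materialised list)
def pvALoop (cs : List Char) (marker_index i n : Int) : Option Int :=
  if i < n then
    if !(pvAInner (PySem.List.slice cs (some (i - marker_index)) (some i)) marker_index)
      then some i
      else pvALoop cs marker_index (i + 1) n
  else none
termination_by (n - i).toNat
decreasing_by omega

def first_start_of_packet_marker (data : String) (marker_index : Int) : Option Int :=
  pvALoop data.toList marker_index marker_index (PySem.Str.len data)

-- ===== PORT B =====
-- loop body of B's first for-loop: counts[c] = counts.get(c,0)+1; if counts[c]==2: dup += 1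
def pvCountStep (st : PySem.Dict Char Int × Int) (c : Char) : PySem.Dict Char Int × Int :=
  let counts := st.1.insert c (st.1.getD c 0 + 1)
  (counts, if counts.getD c 0 == 2 then st.2 + 1 else st.2)

-- B's second for-loop ('for i in range(marker_index, n)' with its early return)
def pvBLoop (cs : List Char) (m : Int) :
    List Int → PySem.Dict Char Int → Int → Option Int
  | [], _, _ => none
  | i :: rest, counts, dup =>
    if dup == 0 then some i
    else
      -- out = data[i - marker_index]  (index always in range when reached)
      let outc := (PySem.List.pyGet? cs (i - m)).getD ' '
      let dup1 := if counts.getD outc 0 == 2 then dup - 1 else dup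
      let counts1 := counts.insert outc (counts.getD outc 0 - 1)
      -- c = data[i]
      let c := (PySem.List.pyGet? cs i).getD ' '
      let counts2 := counts1.insert c (counts1.getD c 0 + 1)
      let dup2 := if counts2.getD c 0 == 2 then dup1 + 1 else dup1
      pvBLoop cs m rest counts2 dup2

def first_start_of_packet_marker_alt (data : String) (marker_index : Int) : Option Int :=
  let cs := data.toList
  let n : Int := PySem.Str.len data
  if n ≤ marker_index then none
  else if marker_index ≤ 0 then some marker_index
  else
    let st := (PySem.List.slice cs none (some marker_index)).foldl pvCountStep
      (PySem.Dict.empty, 0)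
    pvBLoop cs marker_index (PySem.List.pyRange marker_index n 1) st.1 st.2

-- ===== PRECONDITION & SPEC =====
def Spec_first_start_of_packet_marker (data : String) (marker_index : Int) (out : Option Int) : Prop := out = first_start_of_packet_marker_alt data marker_index
instance (data : String) (marker_index : Int) (out : Option Int) : Decidable (Spec_first_start_of_packet_marker data marker_index out) := by unfold Spec_first_start_of_packet_marker; infer_instance

-- ===== CLAIM (what is proved, stated in full; the proofs are below) =====
def Claim_equal_first_start_of_packet_marker : Prop := ∀ (data : String) (marker_index : Int), Dom_first_start_of_packet_marker data marker_index → Spec_first_start_of_packet_marker data marker_index (first_start_of_packet_marker data marker_index)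

-- ===== LEMMAS AND PROOFS =====

-- the window data[i-m:i], in Nat indices
def pvWin (cs : List Char) (m i : Nat) : List Char := (cs.drop (i - m)).take m

-- number of distinct characters occurring ≥ 2 times in w (what B's `dup` tracks)
def pvDup (w : List Char) : Int :=
  ∑ x ∈ w.toFinset, (if 2 ≤ w.count x then (1 : Int) else 0)

theorem pvFind?_congr {α : Type} (l : List α) (p q : α → Bool)
    (h : ∀ x ∈ l, p x = q x) : l.find? p = l.find? q := by
  induction l with
  | nil => rfl
  | cons a t ih =>
    simp only [List.find?_cons, h a (by simp)]
    cases q a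
    · exact ih (fun x hx => h x (by simp [hx]))
    · rfl

theorem pvFoldlIf {α : Type} (l : List α) (P : α → Prop) [DecidablePred P] (b : Bool) :
    l.foldl (fun acc x => if P x then true else acc) b = (b || l.any (fun x => decide (P x))) := by
  induction l generalizing b with
  | nil => simp
  | cons a t ih =>
    simp only [List.foldl_cons, List.any_cons]
    rw [ih]
    by_cases h : P a
    · rw [if_pos h]; simp [h]
    · rw [if_neg h]; simp [h]

theorem pvFoldlOrB {α : Type} (l : List α) (g : α → Bool) (b : Bool) :
    l.foldl (fun acc x => acc || g x) b = (b || l.any g) := by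
  induction l generalizing b with
  | nil => simp
  | cons a t ih => simp [ih, Bool.or_assoc]

theorem pvDup_sum_ext (w : List Char) (S : Finset Char) (h : w.toFinset ⊆ S) :
    pvDup w = ∑ x ∈ S, (if 2 ≤ w.count x then (1 : Int) else 0) := by
  unfold pvDup
  refine Finset.sum_subset h ?_
  intro x _ hx
  have : w.count x = 0 := by
    by_contra hc
    exact hx (List.mem_toFinset.2 (List.count_pos_iff.1 (by omega)))
  simp [this]

theorem pvDup_step (w w' : List Char) (c : Char)
    (h : ∀ x, w'.count x = w.count x + (if x = c then 1 else 0)) :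
    pvDup w' = pvDup w + (if w.count c = 1 then 1 else 0) := by
  have hsub : w.toFinset ⊆ w'.toFinset := by
    intro x hx
    have hp : 0 < w.count x := List.count_pos_iff.2 (List.mem_toFinset.1 hx)
    have h2 := h x
    split_ifs at h2 <;>
      exact List.mem_toFinset.2 (List.count_pos_iff.1 (by omega))
  have hc : c ∈ w'.toFinset := by
    have h2 := h c
    rw [if_pos rfl] at h2
    exact List.mem_toFinset.2 (List.count_pos_iff.1 (by omega))
  rw [pvDup, pvDup_sum_ext w w'.toFinset hsub]
  have hpt : ∀ x ∈ w'.toFinset,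
      (if 2 ≤ w'.count x then (1 : Int) else 0)
        = (if 2 ≤ w.count x then (1 : Int) else 0)
          + (if x = c then (if w.count c = 1 then (1 : Int) else 0) else 0) := by
    intro x _
    have h2 := h x
    by_cases hx : x = c
    · subst hx
      rw [if_pos rfl] at h2
      rw [if_pos rfl, h2]
      split_ifs <;> omega
    · rw [if_neg hx] at h2
      rw [if_neg hx, h2]
      omega
  rw [Finset.sum_congr rfl hpt, Finset.sum_add_distrib,
    Finset.sum_ite_eq' w'.toFinset c (fun _ => if w.count c = 1 then (1 : Int) else 0),
    if_pos hc]

theorem pvDup_cons (c : Char) (w : List Char) :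
    pvDup (c :: w) = pvDup w + (if w.count c = 1 then 1 else 0) := by
  refine pvDup_step w (c :: w) c ?_
  intro x
  simp only [List.count_cons, beq_iff_eq]
  by_cases hx : x = c
  · rw [if_pos (by rw [hx]), if_pos hx]
  · rw [if_neg (fun hh => hx hh.symm), if_neg hx]

theorem pvDup_append (w : List Char) (c : Char) :
    pvDup (w ++ [c]) = pvDup w + (if w.count c = 1 then 1 else 0) := by
  refine pvDup_step w (w ++ [c]) c ?_
  intro x
  rw [List.count_append]
  by_cases hx : x = c
  · subst hx; simp
  · rw [if_neg hx]
    have : List.count x [c] = 0 := by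
      rw [List.count_eq_zero]
      simp [hx]
    omega

theorem pvDup_eq_zero_iff (w : List Char) : pvDup w = 0 ↔ w.Nodup := by
  unfold pvDup
  rw [Finset.sum_eq_zero_iff_of_nonneg (by intro x _; split_ifs <;> omega),
    List.nodup_iff_count]
  constructor
  · intro h a
    by_cases ha : a ∈ w
    · have := h a (List.mem_toFinset.2 ha)
      split_ifs at this with hc
      · omega
      · omega
    · have : w.count a = 0 := by
        by_contra hc
        exact ha (List.count_pos_iff.1 (by omega))
      omega
  · intro h x _
    have := h x
    split_ifs with hc
    · omega
    · rfl

theorem pvWin_length (cs : List Char) (m i : Nat) (hm : 0 < m) (hmi : m ≤ i)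
    (hin : i ≤ cs.length) : (pvWin cs m i).length = m := by
  simp only [pvWin, List.length_take, List.length_drop]
  omega

theorem pvWin_eq_cons (cs : List Char) (m i : Nat) (hm : 0 < m) (hmi : m ≤ i)
    (hin : i - m < cs.length) :
    pvWin cs m i = cs[i - m] :: (cs.drop (i - m + 1)).take (m - 1) := by
  obtain ⟨m', rfl⟩ : ∃ m', m = m' + 1 := ⟨m - 1, by omega⟩
  unfold pvWin
  rw [List.drop_eq_getElem_cons hin, List.take_succ_cons]
  simp

theorem pvWin_succ_eq (cs : List Char) (m i : Nat) (hm : 0 < m) (hmi : m ≤ i)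
    (hin : i < cs.length) :
    pvWin cs m (i + 1) = (cs.drop (i - m + 1)).take (m - 1) ++ [cs[i]] := by
  unfold pvWin
  have h1 : i + 1 - m = i - m + 1 := by omega
  rw [h1]
  have hd : cs.drop (i - m + 1)
      = (cs.drop (i - m + 1)).take (m - 1) ++ ((cs.drop (i - m + 1)).drop (m - 1)) :=
    (List.take_append_drop _ _).symm
  have hlen : ((cs.drop (i - m + 1)).take (m - 1)).length = m - 1 := by
    simp
    omega
  conv_lhs => rw [hd]
  rw [List.take_append, hlen, List.take_of_length_le (by omega)]
  have hdd : (cs.drop (i - m + 1)).drop (m - 1) = cs.drop i := by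
    rw [List.drop_drop]
    congr 1
    omega
  rw [hdd, List.drop_eq_getElem_cons hin]
  have hm1 : m - (m - 1) = 1 := by omega
  rw [hm1, List.take_succ_cons, List.take_zero]

-- the common specification both ports are reduced to
def pvPred (cs : List Char) (m : Nat) : Int → Bool :=
  fun j => decide (pvWin cs m j.toNat).Nodup

theorem pvSlice_eq_pvWin (cs : List Char) (m i : Int) (hm : 0 < m) (hmi : m ≤ i) :
    PySem.List.slice cs (some (i - m)) (some i) = pvWin cs m.toNat i.toNat := by
  rw [PySem.List.slice_toNat cs (by omega) (by omega)]
  unfold pvWin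
  congr 1
  · omega
  · congr 1
    omega

-- A's inner double loop decides "window not all-distinct"
theorem pvFound_eq (cs : List Char) (m i : Int) (hm : 0 < m) (hmi : m ≤ i)
    (hin : i ≤ (cs.length : Int)) :
    pvAInner (PySem.List.slice cs (some (i - m)) (some i)) m = !(pvPred cs m.toNat i) := by
  unfold pvAInner
  rw [pvSlice_eq_pvWin cs m i hm hmi]
  set seq := pvWin cs m.toNat i.toNat with hseq
  have hlen : seq.length = m.toNat :=
    pvWin_length cs m.toNat i.toNat (by omega) (by omega) (by omega)
  simp only [pvFoldlIf, Bool.false_or, pvFoldlOrB]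
  unfold pvPred
  rw [← hseq]
  have hiff : ((PySem.List.pyRange 0 m 1).any (fun j =>
      (PySem.List.pyRange (j + 1) m 1).any (fun k =>
        decide (PySem.List.pyGet? seq j = PySem.List.pyGet? seq k))) = true)
      ↔ ¬ seq.Nodup := by
    rw [List.any_eq_true]
    constructor
    · rintro ⟨j, hj, hk⟩
      rw [List.any_eq_true] at hk
      obtain ⟨k, hk, heq⟩ := hk
      rw [PySem.List.mem_pyRange_one] at hj hk
      obtain ⟨jn, rfl⟩ : ∃ jn : Nat, j = (jn : Int) := ⟨j.toNat, by omega⟩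
      obtain ⟨kn, rfl⟩ : ∃ kn : Nat, k = (kn : Int) := ⟨k.toNat, by omega⟩
      rw [decide_eq_true_eq, PySem.List.pyGet?_natCast, PySem.List.pyGet?_natCast,
        List.getElem?_eq_getElem (by omega), List.getElem?_eq_getElem (by omega)] at heq
      intro hnd
      exact (List.pairwise_iff_getElem.1 hnd) jn kn
        (by omega) (by omega) (by omega) (Option.some_injective _ heq)
    · intro hnd
      have hne : ¬ (∀ (a b : Nat) (_ : a < seq.length) (_ : b < seq.length),
          a < b → seq[a] ≠ seq[b]) := fun hc => hnd (List.pairwise_iff_getElem.2 hc)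
      push_neg at hne
      obtain ⟨a, b, ha, hb, hab, heq⟩ := hne
      refine ⟨(a : Int), ?_, ?_⟩
      · rw [PySem.List.mem_pyRange_one]; omega
      · rw [List.any_eq_true]
        refine ⟨(b : Int), ?_, ?_⟩
        · rw [PySem.List.mem_pyRange_one]; omega
        · rw [decide_eq_true_eq, PySem.List.pyGet?_natCast, PySem.List.pyGet?_natCast,
            List.getElem?_eq_getElem ha, List.getElem?_eq_getElem hb]
          exact congrArg some heq
  by_cases hnd : seq.Nodup
  · have : ¬ ((PySem.List.pyRange 0 m 1).any _ = true) := fun hh => (hiff.1 hh) hnd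
    rw [Bool.not_eq_true] at this
    rw [this]
    simp [hnd]
  · rw [hiff.2 hnd]
    simp [hnd]

-- A's outer loop is find? of its per-position test over the index range
theorem pvALoop_eq_find? (cs : List Char) (m : Int) :
    ∀ (k : Nat) (i n : Int), (n - i).toNat = k →
    pvALoop cs m i n = (PySem.List.pyRange i n 1).find? (fun j =>
      !(pvAInner (PySem.List.slice cs (some (j - m)) (some j)) m)) := by
  intro k
  induction k with
  | zero =>
    intro i n hk
    rw [pvALoop, if_neg (by omega), PySem.List.pyRange_one_eq_nil (by omega)]
    rfl
  | succ k ih =>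
    intro i n hk
    rw [pvALoop, if_pos (by omega), PySem.List.pyRange_one_cons (by omega), List.find?_cons]
    cases hb : pvAInner (PySem.List.slice cs (some (i - m)) (some i)) m with
    | true =>
      simp only [hb, Bool.not_true]
      rw [if_neg (by simp)]
      exact ih (i + 1) n (by omega)
    | false =>
      simp [hb]

-- B's prefix loop establishes the counts/dup invariant
theorem pvInit_inv (w : List Char) :
    (∀ c, ((w.foldl pvCountStep (PySem.Dict.empty, 0)).1).getD c 0 = (w.count c : Int))
      ∧ (w.foldl pvCountStep (PySem.Dict.empty, 0)).2 = pvDup w := by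
  induction w using List.reverseRecOn with
  | nil => constructor <;> simp [pvDup, PySem.Dict.getD, PySem.Dict.get?, PySem.Dict.empty]
  | append_singleton w c ih =>
    obtain ⟨ihc, ihd⟩ := ih
    rw [List.foldl_append]
    set st := w.foldl pvCountStep (PySem.Dict.empty, 0) with hst
    simp only [List.foldl_cons, List.foldl_nil]
    constructor
    · intro x
      by_cases hx : x = c
      · subst hx
        simp only [pvCountStep, PySem.Dict.getD_insert_self, ihc x, List.count_append]
        have h1 : List.count x [x] = 1 := by simp
        rw [h1]
        push_cast
        ring
      · simp only [pvCountStep, PySem.Dict.getD_insert_of_ne _ _ _ hx, ihc x,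
          List.count_append]
        have h1 : List.count x [c] = 0 := by
          rw [List.count_eq_zero]; simp [hx]
        rw [h1]
        push_cast
        ring
    · simp only [pvCountStep, PySem.Dict.getD_insert_self, ihd, pvDup_append]
      rw [ihc c]
      have hb : ((w.count c : Int) + 1 == 2) = decide (w.count c = 1) := by
        rw [Bool.eq_iff_iff]
        simp only [beq_iff_eq, decide_eq_true_eq]
        omega
      rw [hb]
      by_cases h : w.count c = 1 <;> simp [h]

-- B's main loop computes find? of the window-Nodup predicate
theorem pvBLoop_eq (cs : List Char) (m : Int) (hm : 0 < m) :
    ∀ (k : Nat) (i : Int) (counts : PySem.Dict Char Int) (dup : Int),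
    ((cs.length : Int) - i).toNat = k → m ≤ i → i ≤ (cs.length : Int) →
    (∀ c, counts.getD c 0 = ((pvWin cs m.toNat i.toNat).count c : Int)) →
    dup = pvDup (pvWin cs m.toNat i.toNat) →
    pvBLoop cs m (PySem.List.pyRange i (cs.length : Int) 1) counts dup
      = (PySem.List.pyRange i (cs.length : Int) 1).find? (pvPred cs m.toNat) := by
  intro k
  induction k with
  | zero =>
    intro i counts dup hk hmi hin _ _
    rw [PySem.List.pyRange_one_eq_nil (by omega)]
    rfl
  | succ k ih =>
    intro i counts dup hk hmi hin hcounts hdup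
    have hiltn : i < (cs.length : Int) := by omega
    rw [PySem.List.pyRange_one_cons hiltn]
    set w := pvWin cs m.toNat i.toNat with hw
    have hpred : (dup == 0) = pvPred cs m.toNat i := by
      unfold pvPred
      rw [← hw]
      by_cases hnd : w.Nodup
      · simp [hnd, hdup, (pvDup_eq_zero_iff w).2 hnd]
      · have hnz : pvDup w ≠ 0 := fun h => hnd ((pvDup_eq_zero_iff w).1 h)
        simp [hnd, hdup, hnz]
    rw [List.find?_cons]
    cases hp : pvPred cs m.toNat i with
    | true =>
      rw [hp] at hpred
      simp [pvBLoop, hpred]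
    | false =>
      rw [hp] at hpred
      simp only [pvBLoop, hpred, Bool.false_eq_true, if_false]
      -- set up the window decomposition
      have ha : (i - m).toNat = i.toNat - m.toNat := by omega
      have haLt : i.toNat - m.toNat < cs.length := by omega
      have hout : (PySem.List.pyGet? cs (i - m)).getD ' '
          = cs[i.toNat - m.toNat]'haLt := by
        rw [PySem.List.pyGet?_eq_some_getElem cs (by omega) (by omega)]
        simp [ha]
      have hiLt : i.toNat < cs.length := by omega
      have hinc : (PySem.List.pyGet? cs i).getD ' ' = cs[i.toNat]'hiLt := by
        rw [PySem.List.pyGet?_eq_some_getElem cs (by omega) (by omega)]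
        simp
      rw [hout, hinc]
      set outc := cs[i.toNat - m.toNat]'haLt with houtc
      set inc := cs[i.toNat]'hiLt with hincdef
      set mid := (cs.drop (i.toNat - m.toNat + 1)).take (m.toNat - 1) with hmid
      have hwc : w = outc :: mid :=
        pvWin_eq_cons cs m.toNat i.toNat (by omega) (by omega) haLt
      have hws : pvWin cs m.toNat (i + 1).toNat = mid ++ [inc] := by
        have h1 : (i + 1).toNat = i.toNat + 1 := by omega
        rw [h1]
        exact pvWin_succ_eq cs m.toNat i.toNat (by omega) (by omega) hiLt
      -- counts of the three windows
      have hcw : ∀ x, w.count x = mid.count x + (if x = outc then 1 else 0) := by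
        intro x
        rw [hwc]
        simp only [List.count_cons, beq_iff_eq]
        by_cases hx : x = outc
        · rw [if_pos (by rw [hx]), if_pos hx]
        · rw [if_neg (fun hh => hx hh.symm), if_neg hx]
      have hcs : ∀ x, (pvWin cs m.toNat (i + 1).toNat).count x
          = mid.count x + (if x = inc then 1 else 0) := by
        intro x
        rw [hws, List.count_append]
        by_cases hx : x = inc
        · subst hx; simp
        · rw [if_neg hx]
          have : List.count x [inc] = 0 := by
            rw [List.count_eq_zero]; simp [hx]
          omega
      -- the updated dict tracks mid, then the new window
      have hc1 : ∀ x, ((counts.insert outc (counts.getD outc 0 - 1)).getD x 0)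
          = (mid.count x : Int) := by
        intro x
        by_cases hx : x = outc
        · rw [hx, PySem.Dict.getD_insert_self, hcounts outc, hcw outc, if_pos rfl]
          push_cast
          ring
        · rw [PySem.Dict.getD_insert_of_ne _ _ _ hx, hcounts x, hcw x, if_neg hx]
          push_cast
          ring
      have hc2 : ∀ x, (((counts.insert outc (counts.getD outc 0 - 1)).insert inc
            ((counts.insert outc (counts.getD outc 0 - 1)).getD inc 0 + 1)).getD x 0)
          = ((pvWin cs m.toNat (i + 1).toNat).count x : Int) := by
        intro x
        by_cases hx : x = inc
        · rw [hx, PySem.Dict.getD_insert_self, hc1 inc, hcs inc, if_pos rfl]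
          push_cast
          ring
        · rw [PySem.Dict.getD_insert_of_ne _ _ _ hx, hc1 x, hcs x, if_neg hx]
          push_cast
          ring
      -- dup after removal tracks mid
      have hdup1 : (if counts.getD outc 0 == 2 then dup - 1 else dup) = pvDup mid := by
        have hco : counts.getD outc 0 = ((mid.count outc : Int) + 1) := by
          rw [hcounts outc, hcw outc, if_pos rfl]
          push_cast
          ring
        have hdw : pvDup w = pvDup mid + (if mid.count outc = 1 then 1 else 0) := by
          rw [hwc]; exact pvDup_cons outc mid
        have hb : ((mid.count outc : Int) + 1 == 2) = decide (mid.count outc = 1) := by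
          rw [Bool.eq_iff_iff]
          simp only [beq_iff_eq, decide_eq_true_eq]
          omega
        rw [hco, hdup, hdw, hb]
        by_cases h : mid.count outc = 1 <;> simp [h]
      rw [hdup1]
      -- dup after insertion tracks the new window
      have hdup2 : (if (((counts.insert outc (counts.getD outc 0 - 1)).insert inc
            ((counts.insert outc (counts.getD outc 0 - 1)).getD inc 0 + 1)).getD inc 0) == 2
          then pvDup mid + 1 else pvDup mid)
          = pvDup (pvWin cs m.toNat (i + 1).toNat) := by
        rw [hc2 inc, hcs inc, if_pos rfl]
        have hda : pvDup (pvWin cs m.toNat (i + 1).toNat)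
            = pvDup mid + (if mid.count inc = 1 then 1 else 0) := by
          rw [hws]; exact pvDup_append mid inc
        have hb : (((mid.count inc + 1 : Nat) : Int) == 2) = decide (mid.count inc = 1) := by
          rw [Bool.eq_iff_iff]
          simp only [beq_iff_eq, decide_eq_true_eq]
          omega
        rw [hda, hb]
        by_cases h : mid.count inc = 1 <;> simp [h]
      rw [hdup2]
      exact ih (i + 1) _ _ (by omega) (by omega) (by omega) hc2 rfl

-- ===== VERDICT (by name: the statement is the Claim_ definition above) =====
theorem first_start_of_packet_marker_spec : Claim_equal_first_start_of_packet_marker := by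
  intro data m _dom
  unfold Spec_first_start_of_packet_marker
  unfold first_start_of_packet_marker first_start_of_packet_marker_alt
  simp only [PySem.Str.len_eq]
  set cs := data.toList with hcs
  rw [pvALoop_eq_find? cs m ((cs.length : Int) - m).toNat m (cs.length : Int) rfl]
  by_cases h1 : (cs.length : Int) ≤ m
  · rw [if_pos h1, PySem.List.pyRange_one_eq_nil h1]
    rfl
  · rw [if_neg h1]
    by_cases h2 : m ≤ 0
    · rw [if_pos h2]
      have houter : PySem.List.pyRange m (cs.length : Int) 1
          = m :: PySem.List.pyRange (m + 1) (cs.length : Int) 1 :=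
        PySem.List.pyRange_one_cons (by omega)
      rw [houter, List.find?_cons]
      have hnil : (PySem.List.pyRange 0 m 1) = [] := PySem.List.pyRange_one_eq_nil h2
      simp [hnil, pvAInner]
    · rw [if_neg h2]
      have hm : 0 < m := by omega
      -- A's side: the per-position scan decides window-distinctness
      have hA : (PySem.List.pyRange m (cs.length : Int) 1).find? (fun j =>
          !(pvAInner (PySem.List.slice cs (some (j - m)) (some j)) m))
          = (PySem.List.pyRange m (cs.length : Int) 1).find? (pvPred cs m.toNat) := by
        refine pvFind?_congr _ _ _ ?_
        intro i hi
        rw [PySem.List.mem_pyRange_one] at hi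
        rw [pvFound_eq cs m i hm (by omega) (by omega)]
        simp
      -- B's side: prefix invariant + sliding loop
      have hpre : PySem.List.slice cs none (some m) = pvWin cs m.toNat m.toNat := by
        rw [PySem.List.slice_to cs (by omega)]
        unfold pvWin
        simp
      have hinv := pvInit_inv (pvWin cs m.toNat m.toNat)
      have hB := pvBLoop_eq cs m hm ((cs.length : Int) - m).toNat m
        ((pvWin cs m.toNat m.toNat).foldl pvCountStep (PySem.Dict.empty, 0)).1
        ((pvWin cs m.toNat m.toNat).foldl pvCountStep (PySem.Dict.empty, 0)).2
        rfl (le_refl m) (by omega) hinv.1 hinv.2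
      rw [hpre, hB]
      exact hA
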